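-- pv_equiv track=rewrite | github.com/osso841/stark_2 | stark-002 Terminado/stark-2/stark/f_calculos.py | agrupar_superheroes_segun_caracteristica
-- ===== SOURCE A (Python) =====
-- def agrupar_superheroes_segun_caracteristica(lista_personajes:list, caracteristica_a_listar:str) -> dict:  #aplicado I j g h
--     """
--     Agrupa a los superhéroes según una característica especificada y devuelve un diccionario.
--
--     Args:
--         lista_personajes (list[dict]): Lista de diccionarios de personajes.
--         caracteristica_a_listar (str): La característica por la cual se va a agrupar.
--
--     Returns:
--         dict: Un diccionario donde las claves son los valores de la característica y los valores son listas de nombres de superhéroes.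
--
--     """
--
--     diccionario_caracteristica_salida = {}
--
--     for personaje in lista_personajes:
--
--         if personaje[caracteristica_a_listar] == "":
--             continue
--
--         if personaje[caracteristica_a_listar] not in diccionario_caracteristica_salida.keys():
--             diccionario_caracteristica_salida[personaje[caracteristica_a_listar]] = []
--         diccionario_caracteristica_salida[personaje[caracteristica_a_listar]].append(personaje['nombre'])
--
--     return diccionario_caracteristica_salida
-- ===== SOURCE B (Python) =====
-- def agrupar_superheroes_segun_caracteristica(lista_personajes: list, caracteristica_a_listar: str) -> dict:
--     # First pass: collect distinct non-empty characteristic values in first-encounter order.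
--     claves = []
--     for personaje in lista_personajes:
--         valor = personaje[caracteristica_a_listar]
--         if valor != "" and valor not in claves:
--             claves.append(valor)
--     # Second pass: one comprehension per key over the full list.
--     return {clave: [personaje['nombre'] for personaje in lista_personajes
--                     if personaje[caracteristica_a_listar] == clave]
--             for clave in claves}
-- ===== Notes on version B (the rewrite author's own statement) =====
-- stated objective: alternative
-- what changed: Instead of building the groups incrementally in one pass with insert-or-append into the dict, B first collects the distinct non-empty characteristic values in first-encounter order and then builds each group by a separate scan of the full list per key.
import Mathlib
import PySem

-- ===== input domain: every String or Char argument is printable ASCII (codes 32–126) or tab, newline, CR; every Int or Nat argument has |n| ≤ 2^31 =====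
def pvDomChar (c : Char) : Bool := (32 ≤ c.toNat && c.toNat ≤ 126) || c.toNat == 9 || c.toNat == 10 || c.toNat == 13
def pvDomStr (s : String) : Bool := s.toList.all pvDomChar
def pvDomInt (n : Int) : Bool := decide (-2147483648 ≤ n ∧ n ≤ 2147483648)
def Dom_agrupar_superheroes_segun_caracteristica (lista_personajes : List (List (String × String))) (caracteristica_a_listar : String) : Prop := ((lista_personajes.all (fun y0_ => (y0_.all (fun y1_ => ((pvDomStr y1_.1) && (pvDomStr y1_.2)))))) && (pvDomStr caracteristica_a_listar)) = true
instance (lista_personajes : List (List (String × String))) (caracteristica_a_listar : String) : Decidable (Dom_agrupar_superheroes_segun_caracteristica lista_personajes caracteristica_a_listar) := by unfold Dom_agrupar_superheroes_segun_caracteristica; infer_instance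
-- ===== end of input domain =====

-- B replaces A's single insert-or-append pass with a key-collection pass followed by one
-- full re-scan of the list per key (objective: alternative decomposition, not faster).

-- Shared dict-lookup helper: personaje[k] as a first-match association-list lookup;
-- returns "" where Python would raise KeyError (such inputs are excluded by Pre_).
def pvGetS (p : List (String × String)) (k : String) : String :=
  ((p.find? (fun kv => kv.1 == k)).map (fun kv => kv.2)).getD ""

-- ===== PORT A =====
def agrupar_superheroes_segun_caracteristica (lista_personajes : List (List (String × String))) (caracteristica_a_listar : String) : List (String × List String) :=
  (lista_personajes.foldl
    (fun d personaje =>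
      let v := pvGetS personaje caracteristica_a_listar
      if v == "" then d
      else
        let d := if d.contains v then d else d.insert v []
        d.modify v [] (fun l => l ++ [pvGetS personaje "nombre"]))
    (PySem.Dict.empty : PySem.Dict String (List String))).items

-- ===== PORT B =====
def agrupar_superheroes_segun_caracteristica_alt (lista_personajes : List (List (String × String))) (caracteristica_a_listar : String) : List (String × List String) :=
  let claves := lista_personajes.foldl
    (fun ks personaje =>
      let valor := pvGetS personaje caracteristica_a_listar
      if valor != "" && !(ks.contains valor) then ks ++ [valor] else ks) []
  claves.map (fun clave =>
    (clave,
      (lista_personajes.filter (fun personaje => pvGetS personaje caracteristica_a_listar == clave)).map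
        (fun personaje => pvGetS personaje "nombre")))

-- ===== PRECONDITION & SPEC =====
-- Pre_ excludes exactly the inputs on which Python A raises KeyError: a personaje missing
-- the grouping key, or missing 'nombre' while its characteristic value is non-empty.
def Pre_agrupar_superheroes_segun_caracteristica (lista_personajes : List (List (String × String))) (caracteristica_a_listar : String) : Prop :=
  ∀ p ∈ lista_personajes,
    (p.find? (fun kv => kv.1 == caracteristica_a_listar)).isSome = true ∧
    (pvGetS p caracteristica_a_listar ≠ "" → (p.find? (fun kv => kv.1 == "nombre")).isSome = true)
instance (lista_personajes : List (List (String × String))) (caracteristica_a_listar : String) : Decidable (Pre_agrupar_superheroes_segun_caracteristica lista_personajes caracteristica_a_listar) := by unfold Pre_agrupar_superheroes_segun_caracteristica; infer_instance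
def pvWitness_agrupar_superheroes_segun_caracteristica : (List (List (String × String))) × String :=
  ([[("nombre", "Hulk"), ("color", "verde")], [("nombre", "Flash"), ("color", "rojo")], [("nombre", "X"), ("color", "")]], "color")

def Spec_agrupar_superheroes_segun_caracteristica (lista_personajes : List (List (String × String))) (caracteristica_a_listar : String) (out : List (String × List String)) : Prop := out = agrupar_superheroes_segun_caracteristica_alt lista_personajes caracteristica_a_listar
instance (lista_personajes : List (List (String × String))) (caracteristica_a_listar : String) (out : List (String × List String)) : Decidable (Spec_agrupar_superheroes_segun_caracteristica lista_personajes caracteristica_a_listar out) := by unfold Spec_agrupar_superheroes_segun_caracteristica; infer_instance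

-- ===== CLAIM (what is proved, stated in full; the proofs are below) =====
def Claim_equal_agrupar_superheroes_segun_caracteristica : Prop := ∀ (lista_personajes : List (List (String × String))) (caracteristica_a_listar : String), Dom_agrupar_superheroes_segun_caracteristica lista_personajes caracteristica_a_listar → Pre_agrupar_superheroes_segun_caracteristica lista_personajes caracteristica_a_listar → Spec_agrupar_superheroes_segun_caracteristica lista_personajes caracteristica_a_listar (agrupar_superheroes_segun_caracteristica lista_personajes caracteristica_a_listar)

-- ===== LEMMAS AND PROOFS =====

-- A's loop body and B's key-collection step, named for the proofs.
def stepA (car : String) (d : PySem.Dict String (List String)) (p : List (String × String)) : PySem.Dict String (List String) :=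
  let v := pvGetS p car
  if v == "" then d
  else
    let d := if d.contains v then d else d.insert v []
    d.modify v [] (fun l => l ++ [pvGetS p "nombre"])

def stepK (car : String) (ks : List String) (p : List (String × String)) : List String :=
  let valor := pvGetS p car
  if valor != "" && !(ks.contains valor) then ks ++ [valor] else ks

lemma keys_stepA (car : String) (d : PySem.Dict String (List String)) (p : List (String × String)) :
    (stepA car d p).keys = stepK car d.keys p := by
  set v := pvGetS p car with hv
  by_cases h0 : v = ""
  · simp [stepA, stepK, ← hv, h0]
  · by_cases hc : d.contains v = true
    · have hm : v ∈ d.keys := by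
        rw [PySem.Dict.contains_eq_decide_mem_keys] at hc
        simpa using hc
      simp [stepA, stepK, ← hv, h0, hc, hm, PySem.Dict.keys_modify,
        PySem.Dict.keys_insert_of_contains _ _ hc]
    · have hc' : d.contains v = false := by simpa using hc
      have hm : v ∉ d.keys := by
        rw [PySem.Dict.contains_eq_decide_mem_keys] at hc'
        simpa using hc'
      simp [stepA, stepK, ← hv, h0, hc', PySem.Dict.keys_modify,
        PySem.Dict.insert_insert_self, PySem.Dict.keys_insert_of_not_contains _ _ hc']
      exact hm

lemma keys_fold (car : String) (xs : List (List (String × String))) :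
    ∀ d : PySem.Dict String (List String),
      (xs.foldl (stepA car) d).keys = xs.foldl (stepK car) d.keys := by
  induction xs with
  | nil => intro d; rfl
  | cons p xs ih =>
      intro d
      simp only [List.foldl_cons, ih, keys_stepA]

lemma nodup_keys_stepA (car : String) (d : PySem.Dict String (List String)) (p : List (String × String))
    (h : d.keys.Nodup) : (stepA car d p).keys.Nodup := by
  set v := pvGetS p car with hv
  by_cases h0 : v = ""
  · simpa [stepA, ← hv, h0]
  · by_cases hc : d.contains v = true
    · simpa [stepA, ← hv, h0, hc, PySem.Dict.keys_modify,
        PySem.Dict.keys_insert_of_contains _ _ hc]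
    · have hc' : d.contains v = false := by simpa using hc
      have hstep : stepA car d p = (d.insert v []).modify v [] (fun l => l ++ [pvGetS p "nombre"]) := by
        simp [stepA, ← hv, h0, hc']
      rw [hstep, PySem.Dict.keys_modify, PySem.Dict.insert_insert_self,
        PySem.Dict.keys_insert_of_not_contains _ _ hc']
      have hm : v ∉ d.keys := by
        rw [PySem.Dict.contains_eq_decide_mem_keys] at hc'
        simpa using hc'
      exact List.Nodup.append h (List.nodup_singleton v)
        (by intro a ha hb; simp at hb; subst hb; exact hm ha)

lemma nodup_keys_fold (car : String) (xs : List (List (String × String))) :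
    ∀ d : PySem.Dict String (List String), d.keys.Nodup → (xs.foldl (stepA car) d).keys.Nodup := by
  induction xs with
  | nil => intro d h; exact h
  | cons p xs ih => intro d h; exact ih _ (nodup_keys_stepA car d p h)

lemma getD_stepA (car : String) (d : PySem.Dict String (List String)) (p : List (String × String))
    (k : String) (hk : k ≠ "") :
    (stepA car d p).getD k [] =
      d.getD k [] ++ (if pvGetS p car = k then [pvGetS p "nombre"] else []) := by
  set v := pvGetS p car with hv
  by_cases h0 : v = ""
  · have hne : ¬ v = k := fun h => hk (h ▸ h0)
    simp [stepA, ← hv, h0, hk]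
  · by_cases hvk : v = k
    · subst hvk
      by_cases hc : d.contains v = true
      · simp [stepA, ← hv, h0, hc, PySem.Dict.getD_modify_self]
      · have hc' : d.contains v = false := by simpa using hc
        simp [stepA, ← hv, h0, hc', PySem.Dict.getD_modify_self,
          PySem.Dict.getD_insert_self, PySem.Dict.getD_of_not_contains d _ hc']
    · have hne : k ≠ v := fun h => hvk h.symm
      by_cases hc : d.contains v = true
      · simp [stepA, ← hv, h0, hc, hvk, PySem.Dict.getD_modify_of_ne _ _ _ hne]
      · have hc' : d.contains v = false := by simpa using hc
        simp [stepA, ← hv, h0, hc', hvk, PySem.Dict.getD_modify_of_ne _ _ _ hne,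
          PySem.Dict.getD_insert_of_ne _ _ _ hne]

lemma getD_fold (car : String) (xs : List (List (String × String))) :
    ∀ (d : PySem.Dict String (List String)) (k : String), k ≠ "" →
      (xs.foldl (stepA car) d).getD k [] =
        d.getD k [] ++ (xs.filter (fun p => pvGetS p car == k)).map (fun p => pvGetS p "nombre") := by
  induction xs with
  | nil => intro d k _; simp
  | cons p xs ih =>
      intro d k hk
      rw [List.foldl_cons, ih _ k hk, getD_stepA car d p k hk]
      by_cases hm : pvGetS p car = k
      · simp [hm]
      · simp [hm]

lemma mem_stepK_ne_empty (car : String) (ks : List String) (p : List (String × String))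
    (h : ∀ k ∈ ks, k ≠ "") : ∀ k ∈ stepK car ks p, k ≠ "" := by
  intro k hk
  rw [stepK] at hk
  by_cases h0 : pvGetS p car = ""
  · simp [h0] at hk
    exact h k hk
  · split at hk
    · rcases List.mem_append.mp hk with hk | hk
      · exact h k hk
      · simp at hk; subst hk; exact h0
    · exact h k hk

lemma mem_foldK_ne_empty (car : String) (xs : List (List (String × String))) :
    ∀ ks : List String, (∀ k ∈ ks, k ≠ "") → ∀ k ∈ xs.foldl (stepK car) ks, k ≠ "" := by
  induction xs with
  | nil => intro ks h; exact h
  | cons p xs ih =>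
      intro ks h
      exact ih _ (mem_stepK_ne_empty car ks p h)

-- ===== VERDICT (by name: the statement is the Claim_ definition above) =====
theorem agrupar_superheroes_segun_caracteristica_spec : Claim_equal_agrupar_superheroes_segun_caracteristica := by
  intro lista car _ _
  unfold Spec_agrupar_superheroes_segun_caracteristica
  unfold agrupar_superheroes_segun_caracteristica agrupar_superheroes_segun_caracteristica_alt
  have hfoldA : (fun (d : PySem.Dict String (List String)) personaje =>
      let v := pvGetS personaje car
      if v == "" then d
      else
        let d := if d.contains v then d else d.insert v []
        d.modify v [] (fun l => l ++ [pvGetS personaje "nombre"])) = stepA car := rfl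
  have hfoldK : (fun (ks : List String) personaje =>
      let valor := pvGetS personaje car
      if valor != "" && !(ks.contains valor) then ks ++ [valor] else ks) = stepK car := rfl
  rw [hfoldA, hfoldK]
  have hnd : (lista.foldl (stepA car) PySem.Dict.empty).keys.Nodup :=
    nodup_keys_fold car lista _ (by simp [PySem.Dict.keys_empty])
  rw [PySem.Dict.items_eq_map_keys _ hnd []]
  rw [keys_fold car lista PySem.Dict.empty, PySem.Dict.keys_empty]
  apply List.map_congr_left
  intro k hk
  have hkne : k ≠ "" := mem_foldK_ne_empty car lista [] (by simp) k hk
  rw [getD_fold car lista PySem.Dict.empty k hkne]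
  simp
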